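-- pv_equiv track=rewrite | github.com/wdi2020/wdi_python | pojebane_pomysly/zad1.py | check_wiersz
-- ===== SOURCE A (Python) =====
-- def check_wiersz(tab):
--     def to_binary(num):
--         t = []
--         while num != 0:
--             t.insert(0,num%2)
--             num//=2
--         ret  = 0
--         for elem in t:
--             ret *=10
--             ret += elem
--         return ret
--     def czy_pierwsza(num):
--         if num <=1:
--             return False
--         if num==2 or num==3:
--             return True
--         if num%2==0 or num%3==0:
--             return False
--         i = 5
--         while i*2 <= num:
--             if num%i==0 or num%(i+2)==0:
--                 return False
--             i+=6
--         return True
--     for row in tab: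
--         suma  = 0
--         for elem in row:
--             suma += elem
--         if not czy_pierwsza(to_binary(suma)):
--             return False
-- ===== SOURCE B (Python) =====
-- def check_wiersz(tab):
--     def czy_pierwsza(num):
--         if num <= 1:
--             return False
--         d = 2
--         while d * d <= num:
--             if num % d == 0:
--                 return False
--             d += 1
--         return True
--     for row in tab:
--         if not czy_pierwsza(int(bin(sum(row))[2:])):
--             return False
-- ===== Notes on version B (the rewrite author's own statement) =====
-- stated objective: simpler
-- what changed: Primality is decided by plain trial division with bound d*d <= n instead of A's 2/3 pre-checks plus a 6k+/-1 wheel bounded by n/2, and the binary-digits-read-as-decimal number is obtained via int(bin(s)[2:]) instead of A's digit-list building loop followed by a base-10 fold; the row loop uses sum().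
import Mathlib
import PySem

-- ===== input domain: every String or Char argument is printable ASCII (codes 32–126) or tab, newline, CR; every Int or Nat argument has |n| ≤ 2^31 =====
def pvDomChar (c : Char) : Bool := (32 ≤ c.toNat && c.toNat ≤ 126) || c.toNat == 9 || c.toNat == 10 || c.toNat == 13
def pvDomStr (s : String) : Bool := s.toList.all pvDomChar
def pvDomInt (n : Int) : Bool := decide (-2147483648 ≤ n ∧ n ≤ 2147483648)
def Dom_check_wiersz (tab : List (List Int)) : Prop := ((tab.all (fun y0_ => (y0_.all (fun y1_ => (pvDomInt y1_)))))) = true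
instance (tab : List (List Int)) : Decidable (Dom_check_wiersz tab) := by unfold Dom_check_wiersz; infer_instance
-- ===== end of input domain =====

-- B replaces A's 6k±1 wheel (bound n/2) by plain trial division (bound d*d ≤ n) and A's
-- digit-list-then-fold binary encoding by int(bin(s)[2:]); equal return values are proved.
-- (On a row with negative sum that the scan reaches, the Python A loops forever and the
-- Python B raises ValueError — neither returns, so nothing is claimed there; the ports
-- make both total at such rows in the agreeing way: the negative sum reads as 0.)

-- ===== PORT A =====
-- while num != 0: t.insert(0, num%2); num //= 2   — for num < 0 the Python loop never
-- terminates (num //= 2 converges to -1), so nothing is claimed there; the port returns [] there.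
def pvToBinList (num : Int) : List Int :=
  if _h : 0 < num then
    pvToBinList (PySem.Int.floordiv num 2) ++ [PySem.Int.mod num 2]
  else []
termination_by num.toNat
decreasing_by
  rw [PySem.Int.floordiv_eq_ediv_of_pos (by omega : (0:Int) < 2)]
  omega

def to_binary (num : Int) : Int :=
  (pvToBinList num).foldl (fun ret elem => ret * 10 + elem) 0

def czyLoop (num i : Int) : Bool :=
  if h : i * 2 ≤ num then
    if PySem.Int.mod num i = 0 ∨ PySem.Int.mod num (i + 2) = 0 then false
    else czyLoop num (i + 6)
  else true
termination_by (num + 1 - 2 * i).toNat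
decreasing_by omega

def czy_pierwsza (num : Int) : Bool :=
  if num ≤ 1 then false
  else if num = 2 ∨ num = 3 then true
  else if PySem.Int.mod num 2 = 0 ∨ PySem.Int.mod num 3 = 0 then false
  else czyLoop num 5

def check_wiersz (tab : List (List Int)) : Option Bool :=
  match tab with
  | [] => none
  | row :: rest =>
    let suma := row.foldl (fun s e => s + e) 0
    if ¬ czy_pierwsza (to_binary suma) then some false else check_wiersz rest

-- ===== PORT B =====
-- int(bin(s)[2:]): read the binary digits of s as a decimal number; exact for s ≥ 0
-- (for s < 0 the Python raises ValueError, so nothing is claimed there; the port reads s.toNat = 0).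
def pvBinDec (n : Nat) : Int :=
  if n = 0 then 0 else pvBinDec (n / 2) * 10 + (n % 2 : Nat)

def pvAltLoop (n d : Int) : Bool :=
  if h : d * d ≤ n then
    if PySem.Int.mod n d = 0 then false else pvAltLoop n (d + 1)
  else true
termination_by (n + 1 - d).toNat
decreasing_by
  have hdn : d ≤ n := by nlinarith
  omega

def pvCzyPierwszaAlt (num : Int) : Bool :=
  if num ≤ 1 then false else pvAltLoop num 2

def check_wiersz_alt (tab : List (List Int)) : Option Bool :=
  match tab with
  | [] => none
  | row :: rest =>
    if ¬ pvCzyPierwszaAlt (pvBinDec row.sum.toNat) then some false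
    else check_wiersz_alt rest

-- ===== PRECONDITION & SPEC =====
def Spec_check_wiersz (tab : List (List Int)) (out : Option Bool) : Prop := out = check_wiersz_alt tab
instance (tab : List (List Int)) (out : Option Bool) : Decidable (Spec_check_wiersz tab out) := by unfold Spec_check_wiersz; infer_instance

-- ===== CLAIM (what is proved, stated in full; the proofs are below) =====
def Claim_equal_check_wiersz : Prop := ∀ (tab : List (List Int)), Dom_check_wiersz tab → Spec_check_wiersz tab (check_wiersz tab)

-- ===== LEMMAS AND PROOFS =====

-- A's digit-list fold equals B's direct recursion: to_binary s = pvBinDec s.toNat.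
theorem pv_tb (s : Int) :
    (pvToBinList s).foldl (fun ret elem => ret * 10 + elem) 0 = pvBinDec s.toNat := by
  by_cases h : 0 < s
  · rw [pvToBinList]
    simp only [h, dite_true]
    rw [List.foldl_append]
    have hfd : PySem.Int.floordiv s 2 = s / 2 :=
      PySem.Int.floordiv_eq_ediv_of_pos (by omega)
    have := pv_tb (s / 2)
    rw [hfd, this]
    simp only [List.foldl_cons, List.foldl_nil]
    conv_rhs => rw [pvBinDec]
    have hs0 : s.toNat ≠ 0 := by omega
    rw [if_neg hs0]
    have h1 : (s / 2).toNat = s.toNat / 2 := by omega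
    have h2 : PySem.Int.mod s 2 = ((s.toNat % 2 : Nat) : Int) := by
      rw [PySem.Int.mod_eq_emod_of_pos (by omega)]
      omega
    rw [h1, h2]
  · rw [pvToBinList]
    simp only [h, dite_false]
    have : s.toNat = 0 := by omega
    rw [this, pvBinDec]
    simp
termination_by s.toNat
decreasing_by omega

theorem pv_to_binary_eq (s : Int) : to_binary s = pvBinDec s.toNat := by
  rw [to_binary, pv_tb]

-- B's loop checks every candidate from d upward while d*d ≤ n.
theorem pv_altLoop_iff (n d : Int) (hd : 1 ≤ d) :
    pvAltLoop n d = true ↔ ∀ m : Int, d ≤ m → m * m ≤ n → ¬ (m ∣ n) := by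
  rw [pvAltLoop]
  by_cases h : d * d ≤ n
  · simp only [h, dite_true]
    by_cases hdvd : PySem.Int.mod n d = 0
    · simp only [hdvd, if_true]
      constructor
      · intro hF; simp at hF
      · intro hall
        exact absurd ((PySem.Int.mod_eq_zero_iff_dvd n d).mp hdvd)
          (hall d le_rfl h)
    · simp only [hdvd, if_false]
      rw [pv_altLoop_iff n (d + 1) (by omega)]
      constructor
      · intro hall m hm hmm
        rcases eq_or_lt_of_le hm with rfl | hlt
        · exact fun hd' => hdvd ((PySem.Int.mod_eq_zero_iff_dvd n d).mpr hd')
        · exact hall m (by omega) hmm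
      · intro hall m hm hmm
        exact hall m (by omega) hmm
  · simp only [h, dite_false, true_iff]
    intro m hm hmm
    exfalso
    have : d * d ≤ m * m := by nlinarith
    omega
termination_by (n + 1 - d).toNat
decreasing_by
  have hdn : d ≤ n := by nlinarith
  omega

-- A's 6k±1 wheel loop checks exactly the candidates i+6k and i+6k+2 while (i+6k)*2 ≤ n.
theorem pv_czyLoop_iff (n i : Int) :
    czyLoop n i = true ↔
      ∀ k : Int, 0 ≤ k → (i + 6 * k) * 2 ≤ n →
        ¬ ((i + 6 * k) ∣ n) ∧ ¬ ((i + 6 * k + 2) ∣ n) := by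
  rw [czyLoop]
  by_cases h : i * 2 ≤ n
  · simp only [h, dite_true]
    by_cases hdvd : PySem.Int.mod n i = 0 ∨ PySem.Int.mod n (i + 2) = 0
    · simp only [hdvd, if_true]
      constructor
      · intro hF; simp at hF
      · intro hall
        have h0 := hall 0 le_rfl (by omega)
        rcases hdvd with hd1 | hd2
        · exact absurd ((PySem.Int.mod_eq_zero_iff_dvd n i).mp hd1)
            (by simpa using h0.1)
        · exact absurd ((PySem.Int.mod_eq_zero_iff_dvd n (i + 2)).mp hd2)
            (by simpa using h0.2)
    · simp only [hdvd, if_false]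
      push Not at hdvd
      rw [pv_czyLoop_iff n (i + 6)]
      constructor
      · intro hall k hk hkg
        rcases eq_or_lt_of_le hk with hEq | hpos
        · subst hEq
          simp only [mul_zero, add_zero] at hkg ⊢
          exact ⟨fun hd => hdvd.1 ((PySem.Int.mod_eq_zero_iff_dvd n i).mpr hd),
                 fun hd => hdvd.2 ((PySem.Int.mod_eq_zero_iff_dvd n (i + 2)).mpr hd)⟩
        · have := hall (k - 1) (by omega) (by ring_nf; ring_nf at hkg; omega)
          constructor
          · have he : i + 6 + 6 * (k - 1) = i + 6 * k := by ring
            rw [he] at this; exact this.1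
          · have he : i + 6 + 6 * (k - 1) + 2 = i + 6 * k + 2 := by ring
            rw [he] at this; exact this.2
      · intro hall k hk hkg
        have := hall (k + 1) (by omega) (by ring_nf; ring_nf at hkg; omega)
        constructor
        · have he : i + 6 * (k + 1) = i + 6 + 6 * k := by ring
          rw [← he]; exact this.1
        · have he : i + 6 * (k + 1) + 2 = i + 6 + 6 * k + 2 := by ring
          rw [← he]; exact this.2
  · simp only [h, dite_false, true_iff]
    intro k hk hkg
    exfalso; omega
termination_by (n + 1 - 2 * i).toNat
decreasing_by omega

-- If n has no divisor m with 2 ≤ m and m*m ≤ n, it has no proper divisor at all.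
theorem pv_no_proper (n : Int) (h0 : 0 < n)
    (hQ : ∀ m : Int, 2 ≤ m → m * m ≤ n → ¬ (m ∣ n))
    (m : Int) (h2 : 2 ≤ m) (hlt : m < n) (hdvd : m ∣ n) : False := by
  obtain ⟨q, hq⟩ := hdvd
  have hqpos : 0 < q := by nlinarith
  have hq2 : 2 ≤ q := by
    by_contra hc
    have hq1 : q = 1 := by omega
    rw [hq1, mul_one] at hq
    omega
  by_cases hmm : m * m ≤ n
  · exact hQ m h2 hmm ⟨q, hq⟩
  · have hqm : q < m := by nlinarith
    have hqq : q * q ≤ n := by nlinarith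
    exact hQ q hq2 hqq ⟨m, by linarith [hq, mul_comm m q]⟩

-- The two primality tests agree on every integer.
theorem pv_prime_eq (num : Int) : czy_pierwsza num = pvCzyPierwszaAlt num := by
  rw [czy_pierwsza, pvCzyPierwszaAlt]
  by_cases h1 : num ≤ 1
  · simp [h1]
  · simp only [h1, if_false]
    by_cases h23 : num = 2 ∨ num = 3
    · have halt : pvAltLoop num 2 = true := by
        rw [pvAltLoop, dif_neg (by omega : ¬ (2 * 2 ≤ num : Prop))]
      simp [h23, halt]
    · simp only [h23, if_false]
      push Not at h23
      have h4 : 4 ≤ num := by omega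
      rw [Bool.eq_iff_iff]
      rw [pv_altLoop_iff num 2 (by omega)]
      by_cases h2or3 : PySem.Int.mod num 2 = 0 ∨ PySem.Int.mod num 3 = 0
      · simp only [h2or3, if_true, Bool.false_eq_true, false_iff]
        intro hQ
        rcases h2or3 with hd | hd
        · exact hQ 2 le_rfl (by omega) ((PySem.Int.mod_eq_zero_iff_dvd num 2).mp hd)
        · have h3d : (3 : Int) ∣ num := (PySem.Int.mod_eq_zero_iff_dvd num 3).mp hd
          have h2d : ¬ ((2:Int) ∣ num) := by
            intro h2d
            exact hQ 2 le_rfl (by omega) h2d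
          have h9 : 9 ≤ num := by omega
          exact hQ 3 (by omega) (by omega) h3d
      · simp only [h2or3, if_false]
        push Not at h2or3
        have hn2 : ¬ ((2:Int) ∣ num) := fun hd =>
          h2or3.1 ((PySem.Int.mod_eq_zero_iff_dvd num 2).mpr hd)
        have hn3 : ¬ ((3:Int) ∣ num) := fun hd =>
          h2or3.2 ((PySem.Int.mod_eq_zero_iff_dvd num 3).mpr hd)
        rw [pv_czyLoop_iff num 5]
        constructor
        · -- wheel true → no divisor up to sqrt
          intro hall m hm hmm hdvd
          have hm2 : ¬ ((2:Int) ∣ m) := fun h => hn2 (h.trans hdvd)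
          have hm3 : ¬ ((3:Int) ∣ m) := fun h => hn3 (h.trans hdvd)
          have hmod : m % 6 = 1 ∨ m % 6 = 5 := by omega
          have hm5 : 5 ≤ m := by omega
          have h2m : 2 * m ≤ num := by nlinarith
          rcases hmod with hmod | hmod
          · -- m = 7 + 6k, checked as (5+6k)+2
            have hk : ∃ k : Int, 0 ≤ k ∧ m = 5 + 6 * k + 2 := ⟨(m - 7) / 6, by omega, by omega⟩
            obtain ⟨k, hk0, hkm⟩ := hk
            have := (hall k hk0 (by omega)).2
            exact this (by rw [show (5 : Int) + 6 * k + 2 = m by omega]; exact hdvd)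
          · have hk : ∃ k : Int, 0 ≤ k ∧ m = 5 + 6 * k := ⟨(m - 5) / 6, by omega, by omega⟩
            obtain ⟨k, hk0, hkm⟩ := hk
            have := (hall k hk0 (by omega)).1
            exact this (by rw [show (5 : Int) + 6 * k = m by omega]; exact hdvd)
        · -- no divisor up to sqrt → wheel true
          intro hQ k hk hkg
          constructor
          · intro hdvd
            exact pv_no_proper num (by omega) hQ (5 + 6 * k) (by omega) (by omega) hdvd
          · intro hdvd
            exact pv_no_proper num (by omega) hQ (5 + 6 * k + 2) (by omega) (by omega) hdvd

-- Row sums: A's explicit accumulator fold is List.sum.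
theorem pv_sum_eq (row : List Int) : row.foldl (fun s e => s + e) 0 = row.sum := by
  rw [List.sum_eq_foldl]

-- The two Lean ports agree on every table.
theorem pv_ports_eq (tab : List (List Int)) : check_wiersz tab = check_wiersz_alt tab := by
  induction tab with
  | nil => rfl
  | cons row rest ih =>
    rw [check_wiersz, check_wiersz_alt]
    have hrow : czy_pierwsza (to_binary (row.foldl (fun s e => s + e) 0))
        = pvCzyPierwszaAlt (pvBinDec row.sum.toNat) := by
      rw [pv_sum_eq, pv_to_binary_eq, pv_prime_eq]
    simp only [hrow]
    split
    · rfl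
    · exact ih

-- ===== VERDICT (by name: the statement is the Claim_ definition above) =====
theorem check_wiersz_spec : Claim_equal_check_wiersz :=
  fun tab _ => pv_ports_eq tab
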